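-- pv_equiv track=rewrite | github.com/karthiikselvam/payirchi | Arrays/Longest Span with same Sum in two Binary arrays.py | longestSpanSum
-- ===== SOURCE A (Python) =====
-- def longestSpanSum(arr1,arr2):
--     longsum = 0
--     for i in range(len(arr1)):
--         arrsum1 = 0
--         arrsum2 = 0
--         for j in range(i, len(arr2)):
--             arrsum1 += arr1[j]
--             arrsum2 += arr2[j]
--             if arrsum1 == arrsum2:
--                 diff = j - i + 1
--                 longsum = max(longsum , diff)
--
--     return longsum
-- ===== SOURCE B (Python) =====
-- def longestSpanSum(arr1, arr2):
--     # One pass over the difference array: prefix sums + first-occurrence dict.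
--     first = {0: -1}
--     best = 0
--     d = 0
--     for j in range(len(arr2)):
--         d += arr1[j] - arr2[j]
--         if d in first:
--             best = max(best, j - first[d])
--         else:
--             first[d] = j
--     return best
-- ===== Notes on version B (the rewrite author's own statement) =====
-- stated objective: faster
-- what changed: Replaced the O(n^2) double loop over all spans by a single pass that hashes the first occurrence of each prefix sum of the difference array arr1[t]-arr2[t].
-- outside the precondition, e.g. on longestSpanSum([], [5, 5]): A returns 0, B raises IndexError
import Mathlib
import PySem

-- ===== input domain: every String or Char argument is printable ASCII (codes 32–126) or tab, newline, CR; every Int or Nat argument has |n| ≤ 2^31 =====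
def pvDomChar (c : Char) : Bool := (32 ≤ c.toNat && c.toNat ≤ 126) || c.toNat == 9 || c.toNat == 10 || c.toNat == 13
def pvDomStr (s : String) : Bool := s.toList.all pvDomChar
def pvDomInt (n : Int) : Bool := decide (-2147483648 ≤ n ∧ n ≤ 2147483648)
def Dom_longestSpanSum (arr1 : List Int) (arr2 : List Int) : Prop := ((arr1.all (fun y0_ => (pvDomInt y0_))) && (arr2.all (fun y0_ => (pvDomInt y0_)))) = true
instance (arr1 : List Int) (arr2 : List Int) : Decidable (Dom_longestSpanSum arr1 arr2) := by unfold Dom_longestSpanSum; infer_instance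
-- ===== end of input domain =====

-- B replaces A's O(n^2) scan of all spans by a single pass hashing the first occurrence of
-- each prefix sum of the difference array (objective: faster).

-- ===== PORT A =====
def longestSpanSum (arr1 : List Int) (arr2 : List Int) : Int :=
  (PySem.List.pyRange 0 (arr1.length : Int) 1).foldl
    (fun longsum i =>
      ((PySem.List.pyRange i (arr2.length : Int) 1).foldl
        (fun (s : Int × Int × Int) j =>
          let arrsum1 := s.2.1 + PySem.List.pyGetD arr1 j 0
          let arrsum2 := s.2.2 + PySem.List.pyGetD arr2 j 0
          (if arrsum1 = arrsum2 then max s.1 (j - i + 1) else s.1, arrsum1, arrsum2))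
        (longsum, 0, 0)).1)
    0

-- ===== PORT B =====
def longestSpanSum_alt (arr1 : List Int) (arr2 : List Int) : Int :=
  ((PySem.List.pyRange 0 (arr2.length : Int) 1).foldl
    (fun (s : PySem.Dict Int Int × Int × Int) j =>
      let d := s.2.2 + PySem.List.pyGetD arr1 j 0 - PySem.List.pyGetD arr2 j 0
      match s.1.get? d with
      | some k => (s.1, max s.2.1 (j - k), d)
      | none   => (s.1.insert d j, s.2.1, d))
    (PySem.Dict.empty.insert 0 (-1), 0, 0)).2.1

-- ===== PRECONDITION & SPEC =====
-- Pre_ excludes the inputs with len(arr2) > len(arr1): there B raises IndexError at arr1[j], and A raises too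
-- unless arr1 is empty (empty outer range), where A returns 0 before ever indexing.
def Pre_longestSpanSum (arr1 : List Int) (arr2 : List Int) : Prop := arr2.length ≤ arr1.length
instance (arr1 : List Int) (arr2 : List Int) : Decidable (Pre_longestSpanSum arr1 arr2) := by unfold Pre_longestSpanSum; infer_instance
def pvWitness_longestSpanSum : List Int × List Int := ([1, 0, 1, 0], [0, 1, 1])

def Spec_longestSpanSum (arr1 : List Int) (arr2 : List Int) (out : Int) : Prop := out = longestSpanSum_alt arr1 arr2
instance (arr1 : List Int) (arr2 : List Int) (out : Int) : Decidable (Spec_longestSpanSum arr1 arr2 out) := by unfold Spec_longestSpanSum; infer_instance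

-- ===== CLAIM (what is proved, stated in full; the proofs are below) =====
def Claim_equal_longestSpanSum : Prop := ∀ (arr1 : List Int) (arr2 : List Int), Dom_longestSpanSum arr1 arr2 → Pre_longestSpanSum arr1 arr2 → Spec_longestSpanSum arr1 arr2 (longestSpanSum arr1 arr2)

-- ===== LEMMAS AND PROOFS =====

def psum (xs : List Int) : Nat → Int
  | 0 => 0
  | (k+1) => psum xs k + xs.getD k 0
def pdiff (arr1 arr2 : List Int) (k : Nat) : Int := psum arr1 k - psum arr2 k
def firstIdx (arr1 arr2 : List Int) (v : Int) : Nat → Option Nat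
  | 0 => if pdiff arr1 arr2 0 = v then some 0 else none
  | (m+1) =>
    match firstIdx arr1 arr2 v m with
    | some k => some k
    | none => if pdiff arr1 arr2 (m+1) = v then some (m+1) else none
def fdict (arr1 arr2 : List Int) : Nat → PySem.Dict Int Int
  | 0 => PySem.Dict.empty.insert 0 (-1)
  | (m+1) =>
    match (fdict arr1 arr2 m).get? (pdiff arr1 arr2 (m+1)) with
    | some _ => fdict arr1 arr2 m
    | none => (fdict arr1 arr2 m).insert (pdiff arr1 arr2 (m+1)) (m : Int)
def bestB (arr1 arr2 : List Int) : Nat → Int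
  | 0 => 0
  | (m+1) =>
    match (fdict arr1 arr2 m).get? (pdiff arr1 arr2 (m+1)) with
    | some k => max (bestB arr1 arr2 m) ((m : Int) - k)
    | none => bestB arr1 arr2 m

lemma firstIdx_none (arr1 arr2 : List Int) (v : Int) (m : Nat)
    (h : firstIdx arr1 arr2 v m = none) : ∀ k ≤ m, pdiff arr1 arr2 k ≠ v := by
  induction m with
  | zero =>
    intro k hk
    obtain rfl : k = 0 := by omega
    simp only [firstIdx] at h
    split at h
    · exact absurd h (by simp)
    · assumption
  | succ m ih =>
    intro k hk
    rcases hfm : firstIdx arr1 arr2 v m with _ | k0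
    · simp only [firstIdx, hfm] at h
      rcases (by omega : k ≤ m ∨ k = m + 1) with hk' | hk'
      · exact ih hfm k hk'
      · subst hk'
        split at h
        · exact absurd h (by simp)
        · assumption
    · simp only [firstIdx, hfm] at h
      exact absurd h (by simp)

lemma firstIdx_spec (arr1 arr2 : List Int) (v : Int) (m k : Nat)
    (h : firstIdx arr1 arr2 v m = some k) :
    k ≤ m ∧ pdiff arr1 arr2 k = v ∧ ∀ k' < k, pdiff arr1 arr2 k' ≠ v := by
  induction m generalizing k with
  | zero =>
    simp only [firstIdx] at h
    split at h
    · rename_i hp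
      obtain rfl : (0:Nat) = k := Option.some.inj h
      exact ⟨le_refl _, hp, fun k' hk' => absurd hk' (by omega)⟩
    · exact absurd h (by simp)
  | succ m ih =>
    rcases hfm : firstIdx arr1 arr2 v m with _ | k0
    · simp only [firstIdx, hfm] at h
      split at h
      · rename_i hp
        obtain rfl : m + 1 = k := Option.some.inj h
        exact ⟨le_refl _, hp, fun k' hk' => firstIdx_none arr1 arr2 v m hfm k' (by omega)⟩
      · exact absurd h (by simp)
    · simp only [firstIdx, hfm] at h
      obtain rfl : k0 = k := Option.some.inj h
      obtain ⟨h1, h2, h3⟩ := ih k0 hfm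
      exact ⟨Nat.le_succ_of_le h1, h2, h3⟩

lemma firstIdx_exists (arr1 arr2 : List Int) (v : Int) (m k : Nat)
    (hk : k ≤ m) (hv : pdiff arr1 arr2 k = v) :
    ∃ k0, firstIdx arr1 arr2 v m = some k0 ∧ k0 ≤ k := by
  rcases hfm : firstIdx arr1 arr2 v m with _ | k0
  · exact absurd hv (firstIdx_none arr1 arr2 v m hfm k hk)
  · obtain ⟨_, _, h3⟩ := firstIdx_spec arr1 arr2 v m k0 hfm
    refine ⟨k0, rfl, ?_⟩
    by_contra hlt
    exact h3 k (by omega) hv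

lemma fdict_char (arr1 arr2 : List Int) (m : Nat) (v : Int) :
    (fdict arr1 arr2 m).get? v = (firstIdx arr1 arr2 v m).map (fun (k : Nat) => (k : Int) - 1) := by
  induction m generalizing v with
  | zero =>
    simp only [fdict, firstIdx]
    rw [PySem.Dict.get?_insert]
    have h0 : pdiff arr1 arr2 0 = 0 := by simp [pdiff, psum]
    rw [h0]
    by_cases hv : v = 0
    · subst hv; simp
    · rw [if_neg hv, if_neg (fun h => hv h.symm)]
      simp [PySem.Dict.get?_empty]
  | succ m ih =>
    rcases hg : (fdict arr1 arr2 m).get? (pdiff arr1 arr2 (m+1)) with _ | x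
    · -- not present: insert
      have hnone : firstIdx arr1 arr2 (pdiff arr1 arr2 (m+1)) m = none := by
        have h := ih (pdiff arr1 arr2 (m+1))
        rw [hg] at h
        exact Option.map_eq_none_iff.mp h.symm
      simp only [fdict, hg]
      rw [PySem.Dict.get?_insert]
      by_cases hv : v = pdiff arr1 arr2 (m+1)
      · subst hv
        rw [if_pos rfl]
        simp only [firstIdx, hnone]
        congr 1
        push_cast
        ring
      · rw [if_neg hv, ih v]
        congr 1
        simp only [firstIdx]
        rcases hfm : firstIdx arr1 arr2 v m with _ | k0
        · rw [if_neg (fun h => hv h.symm)]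
        · rfl
    · -- present: unchanged
      simp only [fdict, hg]
      rw [ih v]
      congr 1
      simp only [firstIdx]
      rcases hfm : firstIdx arr1 arr2 v m with _ | k0
      · have hvne : pdiff arr1 arr2 (m+1) ≠ v := by
          intro he
          have h := ih (pdiff arr1 arr2 (m+1))
          rw [hg, he, hfm] at h
          simp at h
        rw [if_neg hvne]
      · rfl

lemma bestB_nonneg (arr1 arr2 : List Int) (m : Nat) : 0 ≤ bestB arr1 arr2 m := by
  induction m with
  | zero => exact le_refl _
  | succ m ih =>
    rcases hg : (fdict arr1 arr2 m).get? (pdiff arr1 arr2 (m+1)) with _ | k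
    · simp only [bestB, hg]
      exact ih
    · simp only [bestB, hg]
      exact le_trans ih (le_max_left _ _)

lemma bestB_mono_succ (arr1 arr2 : List Int) (m : Nat) :
    bestB arr1 arr2 m ≤ bestB arr1 arr2 (m+1) := by
  rcases hg : (fdict arr1 arr2 m).get? (pdiff arr1 arr2 (m+1)) with _ | k
  · simp only [bestB, hg]
    exact le_refl _
  · simp only [bestB, hg]
    exact le_max_left _ _

def Cand (arr1 arr2 : List Int) (n i j : Nat) : Prop :=
  i ≤ j ∧ j < n ∧ pdiff arr1 arr2 (j+1) = pdiff arr1 arr2 i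

lemma bestB_cases (arr1 arr2 : List Int) (n m : Nat) (hm : m ≤ n) :
    bestB arr1 arr2 m = 0 ∨
      ∃ i j, Cand arr1 arr2 n i j ∧ bestB arr1 arr2 m = (j : Int) - i + 1 := by
  induction m with
  | zero => exact Or.inl rfl
  | succ m ih =>
    rcases hg : (fdict arr1 arr2 m).get? (pdiff arr1 arr2 (m+1)) with _ | k
    · simp only [bestB, hg]
      exact ih (by omega)
    · simp only [bestB, hg]
      have hch := fdict_char arr1 arr2 m (pdiff arr1 arr2 (m+1))
      rw [hg] at hch
      obtain ⟨k0, hk0, hkv⟩ := Option.map_eq_some_iff.mp hch.symm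
      obtain ⟨hk0m, hk0p, -⟩ := firstIdx_spec arr1 arr2 _ m k0 hk0
      rcases max_choice (bestB arr1 arr2 m) ((m : Int) - k) with hmx | hmx
      · rw [hmx]; exact ih (by omega)
      · rw [hmx]
        refine Or.inr ⟨k0, m, ⟨hk0m, by omega, hk0p.symm⟩, ?_⟩
        omega

lemma bestB_ge (arr1 arr2 : List Int) (m i j : Nat) (hj : j < m)
    (hij : i ≤ j) (hv : pdiff arr1 arr2 (j+1) = pdiff arr1 arr2 i) :
    (j : Int) - i + 1 ≤ bestB arr1 arr2 m := by
  induction m with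
  | zero => omega
  | succ m ih =>
    rcases (by omega : j < m ∨ j = m) with h | h
    · exact le_trans (ih h) (bestB_mono_succ arr1 arr2 m)
    · rw [h] at hij hv ⊢
      obtain ⟨k0, hk0, hk0i⟩ := firstIdx_exists arr1 arr2 (pdiff arr1 arr2 (m+1)) m i hij hv.symm
      have hch := fdict_char arr1 arr2 m (pdiff arr1 arr2 (m+1))
      rw [hk0] at hch
      simp only [Option.map_some] at hch
      simp only [bestB, hch]
      have := le_max_right (bestB arr1 arr2 m) ((m : Int) - ((k0 : Int) - 1))
      omega

lemma foldB (arr1 arr2 : List Int) (m : Nat) :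
    (PySem.List.pyRange 0 (m : Int) 1).foldl
      (fun (s : PySem.Dict Int Int × Int × Int) j =>
        let d := s.2.2 + PySem.List.pyGetD arr1 j 0 - PySem.List.pyGetD arr2 j 0
        match s.1.get? d with
        | some k => (s.1, max s.2.1 (j - k), d)
        | none   => (s.1.insert d j, s.2.1, d))
      (PySem.Dict.empty.insert 0 (-1), 0, 0)
    = (fdict arr1 arr2 m, bestB arr1 arr2 m, pdiff arr1 arr2 m) := by
  induction m with
  | zero =>
    rw [show ((0:Nat):Int) = 0 by norm_num, PySem.List.pyRange_one_eq_nil (le_refl 0)]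
    simp [fdict, bestB, pdiff, psum]
  | succ m ih =>
    rw [show ((m+1:Nat):Int) = (m:Int)+1 by push_cast; ring,
        PySem.List.pyRange_one_succ_right (by positivity), List.foldl_append, ih,
        List.foldl_cons, List.foldl_nil]
    have hd : pdiff arr1 arr2 m + PySem.List.pyGetD arr1 (m:Int) 0 - PySem.List.pyGetD arr2 (m:Int) 0 = pdiff arr1 arr2 (m+1) := by
      rw [PySem.List.pyGetD_natCast, PySem.List.pyGetD_natCast]
      simp only [pdiff, psum]
      ring
    rcases hg : (fdict arr1 arr2 m).get? (pdiff arr1 arr2 (m+1)) with _ | k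
    · simp only [hd, hg, fdict, bestB]
    · simp only [hd, hg, fdict, bestB]

def bestA (arr1 arr2 : List Int) (i : Nat) (L : Int) : Nat → Int
  | 0 => L
  | (t+1) =>
    let p := bestA arr1 arr2 i L t
    if pdiff arr1 arr2 (i+t+1) = pdiff arr1 arr2 i then max p ((t : Int) + 1) else p

lemma innerA_eq (arr1 arr2 : List Int) (i : Nat) (L : Int) (t : Nat) :
    (PySem.List.pyRange (i : Int) ((i+t : Nat) : Int) 1).foldl
        (fun (s : Int × Int × Int) j =>
          let arrsum1 := s.2.1 + PySem.List.pyGetD arr1 j 0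
          let arrsum2 := s.2.2 + PySem.List.pyGetD arr2 j 0
          (if arrsum1 = arrsum2 then max s.1 (j - (i:Int) + 1) else s.1, arrsum1, arrsum2))
        (L, 0, 0)
      = (bestA arr1 arr2 i L t,
         psum arr1 (i+t) - psum arr1 i,
         psum arr2 (i+t) - psum arr2 i) := by
  induction t with
  | zero =>
    rw [show ((i+0:Nat):Int) = (i:Int) by push_cast; ring,
        PySem.List.pyRange_one_eq_nil (le_refl _)]
    simp [bestA]
  | succ t ih =>
    rw [show ((i+(t+1):Nat):Int) = ((i+t:Nat):Int)+1 by push_cast; ring,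
        PySem.List.pyRange_one_succ_right (by push_cast; omega), List.foldl_append, ih,
        List.foldl_cons, List.foldl_nil]
    have h1 : psum arr1 (i+t) - psum arr1 i + PySem.List.pyGetD arr1 ((i+t:Nat):Int) 0
        = psum arr1 (i+t+1) - psum arr1 i := by
      rw [PySem.List.pyGetD_natCast]
      simp only [psum]
      ring
    have h2 : psum arr2 (i+t) - psum arr2 i + PySem.List.pyGetD arr2 ((i+t:Nat):Int) 0
        = psum arr2 (i+t+1) - psum arr2 i := by
      rw [PySem.List.pyGetD_natCast]
      simp only [psum]
      ring
    simp only [h1, h2]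
    have hcond : (psum arr1 (i+t+1) - psum arr1 i = psum arr2 (i+t+1) - psum arr2 i)
        = (pdiff arr1 arr2 (i+t+1) = pdiff arr1 arr2 i) := by
      simp only [pdiff]
      apply propext
      constructor <;> intro <;> omega
    have hval : ((i+t:Nat):Int) - (i:Int) + 1 = (t:Int) + 1 := by push_cast; ring
    simp only [hcond, hval, bestA]
    rfl

def outerA (arr1 arr2 : List Int) (n : Nat) : Nat → Int
  | 0 => 0
  | (m+1) => bestA arr1 arr2 m (outerA arr1 arr2 n m) (n - m)

lemma foldA (arr1 arr2 : List Int) (M : Nat) :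
    (PySem.List.pyRange 0 (M : Int) 1).foldl
      (fun longsum i =>
        ((PySem.List.pyRange i (arr2.length : Int) 1).foldl
          (fun (s : Int × Int × Int) j =>
            let arrsum1 := s.2.1 + PySem.List.pyGetD arr1 j 0
            let arrsum2 := s.2.2 + PySem.List.pyGetD arr2 j 0
            (if arrsum1 = arrsum2 then max s.1 (j - i + 1) else s.1, arrsum1, arrsum2))
          (longsum, 0, 0)).1)
      0
    = outerA arr1 arr2 arr2.length M := by
  induction M with
  | zero =>
    rw [show ((0:Nat):Int) = 0 by norm_num, PySem.List.pyRange_one_eq_nil (le_refl 0)]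
    simp [outerA]
  | succ M ih =>
    rw [show ((M+1:Nat):Int) = (M:Int)+1 by push_cast; ring,
        PySem.List.pyRange_one_succ_right (by positivity), List.foldl_append, ih,
        List.foldl_cons, List.foldl_nil]
    by_cases hM : M ≤ arr2.length
    · rw [show (arr2.length : Int) = ((M + (arr2.length - M) : Nat) : Int) by push_cast; omega,
          innerA_eq arr1 arr2 M (outerA arr1 arr2 arr2.length M) (arr2.length - M)]
      rfl
    · have hnil : PySem.List.pyRange (M:Int) (arr2.length:Int) 1 = [] :=
        PySem.List.pyRange_one_eq_nil (by omega)
      rw [hnil]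
      simp only [List.foldl_nil]
      show _ = bestA arr1 arr2 M (outerA arr1 arr2 arr2.length M) (arr2.length - M)
      rw [show arr2.length - M = 0 by omega]
      rfl

lemma bestA_le (arr1 arr2 : List Int) (i : Nat) (L : Int) (t : Nat) :
    L ≤ bestA arr1 arr2 i L t := by
  induction t with
  | zero => exact le_refl _
  | succ t ih =>
    simp only [bestA]
    split
    · exact le_trans ih (le_max_left _ _)
    · exact ih

lemma bestA_cases (arr1 arr2 : List Int) (i : Nat) (L : Int) (t : Nat) :
    bestA arr1 arr2 i L t = L ∨
      ∃ t' < t, pdiff arr1 arr2 (i+t'+1) = pdiff arr1 arr2 i ∧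
        bestA arr1 arr2 i L t = (t' : Int) + 1 := by
  induction t with
  | zero => exact Or.inl rfl
  | succ t ih =>
    simp only [bestA]
    split
    · rename_i hpd
      rcases max_choice (bestA arr1 arr2 i L t) ((t : Int) + 1) with hm | hm
      · rw [hm]
        rcases ih with h | ⟨t', ht', hp, hv⟩
        · exact Or.inl h
        · exact Or.inr ⟨t', Nat.lt_succ_of_lt ht', hp, hv⟩
      · exact Or.inr ⟨t, Nat.lt_succ_self t, hpd, hm⟩
    · rcases ih with h | ⟨t', ht', hp, hv⟩
      · exact Or.inl h
      · exact Or.inr ⟨t', Nat.lt_succ_of_lt ht', hp, hv⟩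

lemma bestA_ge (arr1 arr2 : List Int) (i : Nat) (L : Int) (t t' : Nat)
    (h1 : t' < t) (h2 : pdiff arr1 arr2 (i+t'+1) = pdiff arr1 arr2 i) :
    (t' : Int) + 1 ≤ bestA arr1 arr2 i L t := by
  induction t with
  | zero => omega
  | succ t ih =>
    simp only [bestA]
    rcases Nat.lt_succ_iff_lt_or_eq.mp h1 with h | h
    · split
      · exact le_trans (ih h) (le_max_left _ _)
      · exact ih h
    · subst h
      rw [if_pos h2]
      exact le_max_right _ _

lemma outerA_nonneg (arr1 arr2 : List Int) (n m : Nat) : 0 ≤ outerA arr1 arr2 n m := by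
  induction m with
  | zero => exact le_refl _
  | succ m ih => exact le_trans ih (bestA_le _ _ _ _ _)

lemma outerA_mono (arr1 arr2 : List Int) (n a b : Nat) (h : a ≤ b) :
    outerA arr1 arr2 n a ≤ outerA arr1 arr2 n b := by
  induction b, h using Nat.le_induction with
  | base => exact le_refl _
  | succ b _ ih => exact le_trans ih (bestA_le _ _ _ _ _)

lemma outerA_cases (arr1 arr2 : List Int) (n m : Nat) :
    outerA arr1 arr2 n m = 0 ∨
      ∃ i j, Cand arr1 arr2 n i j ∧ outerA arr1 arr2 n m = (j : Int) - i + 1 := by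
  induction m with
  | zero => exact Or.inl rfl
  | succ m ih =>
    simp only [outerA]
    rcases bestA_cases arr1 arr2 m (outerA arr1 arr2 n m) (n - m) with h | ⟨t', ht', hp, hv⟩
    · rw [h]; exact ih
    · refine Or.inr ⟨m, m + t', ⟨Nat.le_add_right _ _, by omega, hp⟩, ?_⟩
      rw [hv]; push_cast; ring

lemma outerA_ge (arr1 arr2 : List Int) (n m i j : Nat) (hn : n ≤ m)
    (hc : Cand arr1 arr2 n i j) : (j : Int) - i + 1 ≤ outerA arr1 arr2 n m := by
  obtain ⟨hij, hjn, hpd⟩ := hc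
  have h1 : i + 1 ≤ m := by omega
  refine le_trans ?_ (outerA_mono arr1 arr2 n (i+1) m h1)
  show _ ≤ bestA arr1 arr2 i (outerA arr1 arr2 n i) (n - i)
  have ht : j - i < n - i := by omega
  have hp2 : pdiff arr1 arr2 (i + (j - i) + 1) = pdiff arr1 arr2 i := by
    rw [Nat.add_sub_cancel' hij]; exact hpd
  have := bestA_ge arr1 arr2 i (outerA arr1 arr2 n i) (n - i) (j - i) ht hp2
  have hcast : ((j - i : Nat) : Int) = (j : Int) - i := by omega
  omega

lemma portA_eq (arr1 arr2 : List Int) :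
    longestSpanSum arr1 arr2 = outerA arr1 arr2 arr2.length arr1.length :=
  foldA arr1 arr2 arr1.length

lemma portB_eq (arr1 arr2 : List Int) :
    longestSpanSum_alt arr1 arr2 = bestB arr1 arr2 arr2.length := by
  unfold longestSpanSum_alt
  rw [foldB arr1 arr2 arr2.length]

lemma max_unique (arr1 arr2 : List Int) (n : Nat) (X Y : Int)
    (hX0 : 0 ≤ X) (hY0 : 0 ≤ Y)
    (hXc : X = 0 ∨ ∃ i j, Cand arr1 arr2 n i j ∧ X = (j : Int) - i + 1)
    (hYc : Y = 0 ∨ ∃ i j, Cand arr1 arr2 n i j ∧ Y = (j : Int) - i + 1)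
    (hXg : ∀ i j, Cand arr1 arr2 n i j → (j : Int) - i + 1 ≤ X)
    (hYg : ∀ i j, Cand arr1 arr2 n i j → (j : Int) - i + 1 ≤ Y) : X = Y := by
  apply le_antisymm
  · rcases hXc with h | ⟨i, j, hc, hv⟩
    · rw [h]; exact hY0
    · rw [hv]; exact hYg i j hc
  · rcases hYc with h | ⟨i, j, hc, hv⟩
    · rw [h]; exact hX0
    · rw [hv]; exact hXg i j hc

-- ===== VERDICT (by name: the statement is the Claim_ definition above) =====
theorem longestSpanSum_spec : Claim_equal_longestSpanSum := by
  intro arr1 arr2 _hdom hpre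
  unfold Spec_longestSpanSum
  rw [portA_eq arr1 arr2, portB_eq arr1 arr2]
  exact max_unique arr1 arr2 arr2.length _ _
    (outerA_nonneg _ _ _ _) (bestB_nonneg _ _ _)
    (outerA_cases _ _ _ _) (bestB_cases _ _ _ _ le_rfl)
    (fun i j hc => outerA_ge _ _ _ _ i j hpre hc)
    (fun i j hc => bestB_ge _ _ _ i j hc.2.1 hc.1 hc.2.2)
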